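-- pv_equiv track=rewrite | github.com/tzyian/leetcode | 2419.longest-subarray-with-maximum-bitwise-and.py | longestSubarrayNaive
-- ===== SOURCE A (Python) =====
-- from typing import List
--
-- def longestSubarrayNaive(nums: List[int]) -> int:
--     best_length = 1
--     start = 0
--     highest = nums[0]
--     prev = nums[0]
--
--     for i, ele in enumerate(nums):
--         if (ele & prev) >= highest and ele <= highest:
--             # extending the subarray is better
--             highest = ele & prev
--             prev = highest
--             best_length = max(best_length, i - start + 1)
--         elif ele > highest:
--             # start the count from here
--             start = i
--             prev = ele
--             best_length = 1
--             highest = ele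
--         else:
--             # restart the count
--             start = i
--             prev = ele
--
--     return best_length
-- ===== SOURCE B (Python) =====
-- from typing import List
--
-- def longestSubarrayNaive(nums: List[int]) -> int:
--     # maximum subarray AND equals max(nums); answer = longest run of the max
--     m = nums[0]
--     for x in nums[1:]:
--         if x > m:
--             m = x
--     best = 0
--     cur = 0
--     for x in nums:
--         if x == m:
--             cur += 1
--             if cur > best:
--                 best = cur
--         else:
--             cur = 0
--     return best
-- ===== Notes on version B (the rewrite author's own statement) =====
-- stated objective: simpler
-- what changed: A's single-pass state machine over (best,start,highest,prev) with bitwise ANDs is replaced by the max-run reduction: the maximum subarray AND of same-sign ints is max(nums), so B computes the max and then the longest consecutive run of it, with no bitwise operations or index bookkeeping.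
-- outside the precondition, e.g. on longestSubarrayNaive([-1, 0, -4]): A returns 2, B returns 1; on longestSubarrayNaive([]): A raises IndexError, B raises IndexError
import Mathlib
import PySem

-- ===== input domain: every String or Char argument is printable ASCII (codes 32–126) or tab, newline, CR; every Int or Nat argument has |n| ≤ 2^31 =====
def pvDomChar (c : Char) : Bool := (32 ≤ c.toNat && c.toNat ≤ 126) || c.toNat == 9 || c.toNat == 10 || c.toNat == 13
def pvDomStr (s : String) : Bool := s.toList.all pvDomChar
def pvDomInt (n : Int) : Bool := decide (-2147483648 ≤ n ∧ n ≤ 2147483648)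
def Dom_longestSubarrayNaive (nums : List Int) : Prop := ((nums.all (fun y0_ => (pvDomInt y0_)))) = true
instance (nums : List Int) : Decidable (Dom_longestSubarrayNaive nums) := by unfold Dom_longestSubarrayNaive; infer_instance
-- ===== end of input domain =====

-- B replaces A's AND-tracking state machine by the max-run reduction (max element, then
-- longest consecutive run of it); equivalence is proved on nonempty sign-uniform lists
-- (all elements >= 0, covering the problem's natural domain, or all < 0) per Pre_.


-- ===== PORT A =====
-- one step of A's loop body; state = (best_length, start, highest, prev), p = (i, ele)
def naiveStep (st : Int × Int × Int × Int) (p : Int × Int) : Int × Int × Int × Int :=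
  let (best, start, highest, prev) := st
  let (i, ele) := p
  if PySem.Int.band ele prev ≥ highest ∧ ele ≤ highest then
    -- extending the subarray is better
    (max best (i - start + 1), start, PySem.Int.band ele prev, PySem.Int.band ele prev)
  else if ele > highest then
    -- start the count from here
    (1, i, ele, ele)
  else
    -- restart the count
    (best, i, highest, ele)

def longestSubarrayNaive (nums : List Int) : Int :=
  match PySem.List.pyGet? nums 0 with
  | none => 0   -- nums[0]: IndexError on the empty list; excluded by Pre_
  | some h =>
    ((PySem.List.enumerate nums).foldl naiveStep (1, 0, h, h)).1

-- ===== PORT B =====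
-- m = nums[0] then 'for x in nums[1:]: if x > m: m = x'
def runMax (l : List Int) (m : Int) : Int :=
  match l with
  | [] => m
  | x :: xs => runMax xs (if x > m then x else m)

-- 'for x in nums: ...' streak count; state (best, cur)
def streak (l : List Int) (m : Int) (best : Int) (cur : Int) : Int :=
  match l with
  | [] => best
  | x :: xs =>
    if x = m then
      -- cur += 1; if cur > best: best = cur   (cur+1 written in place of the updated cur)
      streak xs m (if cur + 1 > best then cur + 1 else best) (cur + 1)
    else
      streak xs m best 0

def longestSubarrayNaive_alt (nums : List Int) : Int :=
  match PySem.List.pyGet? nums 0 with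
  | none => 0   -- nums[0]: IndexError on the empty list; excluded by Pre_
  | some h =>
    let m := runMax (PySem.List.slice nums (some 1) none) h
    streak nums m 0 0

-- ===== PRECONDITION & SPEC =====
-- Pre_ excludes the empty list (A's nums[0] raises IndexError) and mixed-sign lists:
-- the problem's natural domain (LeetCode 2419) is positive ints, fully admitted here;
-- on mixed signs the AND of a negative and a nonnegative element can exceed both, A's
-- run extension then counts AND-chains and its value, like B's, solves neither the
-- stated problem — neither value is specified there.
def Pre_longestSubarrayNaive (nums : List Int) : Prop :=
  nums ≠ [] ∧ ((∀ x ∈ nums, 0 ≤ x) ∨ (∀ x ∈ nums, x < 0))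
instance (nums : List Int) : Decidable (Pre_longestSubarrayNaive nums) := by
  unfold Pre_longestSubarrayNaive; infer_instance

def pvWitness_longestSubarrayNaive : List Int := [5, 3, 5, 5, 2]

def Spec_longestSubarrayNaive (nums : List Int) (out : Int) : Prop := out = longestSubarrayNaive_alt nums
instance (nums : List Int) (out : Int) : Decidable (Spec_longestSubarrayNaive nums out) := by unfold Spec_longestSubarrayNaive; infer_instance

-- ===== CLAIM (what is proved, stated in full; the proofs are below) =====
def Claim_equal_longestSubarrayNaive : Prop := ∀ (nums : List Int), Dom_longestSubarrayNaive nums → Pre_longestSubarrayNaive nums → Spec_longestSubarrayNaive nums (longestSubarrayNaive nums)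

-- ===== LEMMAS AND PROOFS =====

-- sign class: all values manipulated by A's loop stay in one class on a sign-uniform list
def Sgn (s : Bool) (x : Int) : Prop := if s then 0 ≤ x else x < 0

-- within one sign class, Python's & is bounded by both operands (false on mixed signs)
theorem band_le_left_sgn (s : Bool) (x y : Int) (hx : Sgn s x) (hy : Sgn s y) :
    PySem.Int.band x y ≤ x := by
  cases s with
  | true =>
    have hx' : 0 ≤ x := by simpa [Sgn] using hx
    have hy' : 0 ≤ y := by simpa [Sgn] using hy
    rw [PySem.Int.band_of_nonneg hx' hy']
    calc ((x.toNat &&& y.toNat : Nat) : Int) ≤ ((x.toNat : Nat) : Int) := by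
          exact_mod_cast Nat.and_le_left
      _ = x := by omega
  | false =>
    have hx' : x < 0 := by simpa [Sgn] using hx
    have hy' : y < 0 := by simpa [Sgn] using hy
    simp only [PySem.Int.band, if_neg (by omega : ¬ (0:Int) ≤ x), if_neg (by omega : ¬ (0:Int) ≤ y)]
    have h1 : (-x - 1).toNat ≤ (-x - 1).toNat ||| (-y - 1).toNat := Nat.left_le_or
    omega

theorem band_le_right_sgn (s : Bool) (x y : Int) (hx : Sgn s x) (hy : Sgn s y) :
    PySem.Int.band x y ≤ y := by
  rw [PySem.Int.band_comm]
  exact band_le_left_sgn s y x hy hx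

-- abstract version of A's loop after the first element: state (M = running max, best, r = current run of M)
def gA (l : List Int) (M best r : Int) : Int :=
  match l with
  | [] => best
  | x :: xs =>
    if x > M then gA xs x 1 1
    else if x = M then gA xs M (max best (r + 1)) (r + 1)
    else gA xs M best 0

-- A's loop, under its invariant, computes gA
theorem loopA_eq_gA (s : Bool) (rest : List Int) : ∀ (M best r i start prev : Int),
    (∀ x ∈ rest, Sgn s x) → Sgn s M → Sgn s prev → 1 ≤ best →
    ((1 ≤ r ∧ prev = M ∧ start = i - r) ∨ (r = 0 ∧ prev < M ∧ start = i - 1)) →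
    ((PySem.List.enumerate rest i).foldl naiveStep (best, start, M, prev)).1 = gA rest M best r := by
  induction rest with
  | nil => intro M best r i start prev _ _ _ _ _; simp [PySem.List.enumerate, gA]
  | cons x xs ih =>
    intro M best r i start prev hsg hM hprev hbest hinv
    have hx : Sgn s x := hsg x (by simp)
    have hxs : ∀ y ∈ xs, Sgn s y := fun y hy => hsg y (by simp [hy])
    rw [PySem.List.enumerate_cons, List.foldl_cons]
    rcases hinv with ⟨hr, hprevM, hstart⟩ | ⟨hr, hprevM, hstart⟩
    · -- current run r ≥ 1, prev = M
      subst hprevM hstart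
      rcases lt_trichotomy x prev with hlt | heq | hgt
      · -- x < M : branch 3
        have hband : ¬ (PySem.Int.band x prev ≥ prev ∧ x ≤ prev) := by
          intro ⟨h1, _⟩
          have := band_le_left_sgn s x prev hx hprev
          omega
        have hgt' : ¬ x > prev := by omega
        simp only [naiveStep, if_neg hband, if_neg hgt']
        rw [gA, if_neg hgt', if_neg (by omega : ¬ x = prev)]
        exact ih prev best 0 (i + 1) i x hxs hM hx hbest (Or.inr ⟨rfl, hlt, by ring⟩)
      · -- x = M : branch 1
        subst heq
        simp only [naiveStep, PySem.Int.band_self]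
        rw [if_pos (⟨le_rfl, le_rfl⟩ : x ≥ x ∧ x ≤ x)]
        rw [gA, if_neg (by omega : ¬ x > x), if_pos rfl]
        have h2 : i - (i - r) + 1 = r + 1 := by ring
        rw [h2]
        exact ih x (max best (r + 1)) (r + 1) (i + 1) (i - r) x hxs hM hx (by omega)
          (Or.inl ⟨by omega, rfl, by ring⟩)
      · -- x > M : branch 2
        have hband : ¬ (PySem.Int.band x prev ≥ prev ∧ x ≤ prev) := by
          intro ⟨_, h2⟩; omega
        simp only [naiveStep, if_neg hband, if_pos hgt]
        rw [gA, if_pos hgt]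
        exact ih x 1 1 (i + 1) i x hxs hx hx le_rfl (Or.inl ⟨le_rfl, rfl, by ring⟩)
    · -- r = 0, prev < M, start = i - 1
      subst hstart
      subst hr
      have hbandle' : PySem.Int.band x prev ≤ prev := band_le_right_sgn s x prev hx hprev
      have hband : ¬ (PySem.Int.band x prev ≥ M ∧ x ≤ M) := by
        intro ⟨h1, _⟩; omega
      rcases lt_trichotomy x M with hlt | heq | hgt
      · -- x < M : branch 3
        have hgt' : ¬ x > M := by omega
        simp only [naiveStep, if_neg hband, if_neg hgt']
        rw [gA, if_neg hgt', if_neg (by omega : ¬ x = M)]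
        exact ih M best 0 (i + 1) i x hxs hM hx hbest (Or.inr ⟨rfl, hlt, by ring⟩)
      · -- x = M : branch 3 (prev < M so the AND is too small), run restarts at 1
        subst heq
        have hgt' : ¬ x > x := by omega
        simp only [naiveStep, if_neg hband, if_neg hgt']
        rw [gA, if_neg hgt', if_pos rfl]
        have hmax : max best (0 + 1) = best := by omega
        rw [hmax]
        exact ih x best 1 (i + 1) i x hxs hM hx hbest (Or.inl ⟨le_rfl, rfl, by ring⟩)
      · -- x > M : branch 2
        simp only [naiveStep, if_neg hband, if_pos hgt]
        rw [gA, if_pos hgt]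
        exact ih x 1 1 (i + 1) i x hxs hx hx le_rfl (Or.inl ⟨le_rfl, rfl, by ring⟩)

-- facts about runMax
theorem le_runMax (l : List Int) : ∀ m, m ≤ runMax l m := by
  induction l with
  | nil => intro m; simp [runMax]
  | cons x xs ih =>
    intro m
    rw [runMax]
    split
    · exact le_trans (by omega) (ih x)
    · exact ih m

theorem runMax_eq_of_le (l : List Int) : ∀ m, (∀ x ∈ l, x ≤ m) → runMax l m = m := by
  induction l with
  | nil => intro m _; simp [runMax]
  | cons x xs ih =>
    intro m h
    rw [runMax]
    rw [if_neg (by have := h x (by simp); omega)]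
    exact ih m (fun y hy => h y (by simp [hy]))

theorem mem_le_runMax (l : List Int) : ∀ m y, y ∈ l → y ≤ runMax l m := by
  induction l with
  | nil => intro m y hy; simp at hy
  | cons x xs ih =>
    intro m y hy
    rw [runMax]
    rcases List.mem_cons.mp hy with rfl | hy'
    · refine le_trans ?_ (le_runMax xs _)
      split <;> omega
    · exact ih _ y hy'

-- when no later element exceeds M, A's abstract loop and B's streak loop coincide
theorem gA_eq_streak_of_le (l : List Int) : ∀ M best r, (∀ x ∈ l, x ≤ M) →
    gA l M best r = streak l M best r := by
  induction l with
  | nil => intro M best r _; simp [gA, streak]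
  | cons x xs ih =>
    intro M best r h
    have hx : x ≤ M := h x (by simp)
    rw [gA, streak, if_neg (by omega : ¬ x > M)]
    by_cases heq : x = M
    · rw [if_pos heq, if_pos heq]
      have hmax : (if r + 1 > best then r + 1 else best) = max best (r + 1) := by
        split <;> omega
      rw [hmax]
      exact ih M _ _ (fun y hy => h y (by simp [hy]))
    · rw [if_neg heq, if_neg heq]
      exact ih M best 0 (fun y hy => h y (by simp [hy]))

-- main bridge: with a strictly larger element still ahead, gA forgets its state and
-- ends up counting runs of the overall maximum exactly as streak does from (0,0)
theorem gA_eq_streak_of_exists (l : List Int) : ∀ M best r, (∃ x ∈ l, M < x) →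
    gA l M best r = streak l (runMax l M) 0 0 := by
  induction l with
  | nil => intro _ _ _ h; rcases h with ⟨x, hx, _⟩; simp at hx
  | cons x xs ih =>
    intro M best r h
    rw [gA, runMax, streak]
    by_cases hgt : x > M
    · rw [if_pos hgt, if_pos hgt]
      by_cases hall : ∀ y ∈ xs, y ≤ x
      · rw [runMax_eq_of_le xs x hall, if_pos rfl]
        have h1 : (if (0:Int) + 1 > 0 then (0:Int) + 1 else 0) = 1 := by norm_num
        rw [h1]
        exact gA_eq_streak_of_le xs x 1 1 hall
      · push Not at hall
        rcases hall with ⟨y, hy, hxy⟩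
        have hxm : x < runMax xs x := lt_of_lt_of_le hxy (mem_le_runMax xs x y hy)
        rw [if_neg (by omega : ¬ x = runMax xs x)]
        exact ih x 1 1 ⟨y, hy, hxy⟩
    · rw [if_neg hgt, if_neg hgt]
      have hwit : ∃ y ∈ xs, M < y := by
        rcases h with ⟨y, hy, hMy⟩
        rcases List.mem_cons.mp hy with rfl | hy'
        · omega
        · exact ⟨y, hy', hMy⟩
      have hm : M < runMax xs M := by
        rcases hwit with ⟨y, hy, hMy⟩
        exact lt_of_lt_of_le hMy (mem_le_runMax xs M y hy)
      rw [if_neg (by omega : ¬ x = runMax xs M)]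
      by_cases heq : x = M
      · rw [if_pos heq]; exact ih M _ _ hwit
      · rw [if_neg heq]; exact ih M best 0 hwit

-- ===== VERDICT (by name: the statement is the Claim_ definition above) =====
theorem longestSubarrayNaive_spec : Claim_equal_longestSubarrayNaive := by
  intro nums _ hpre
  unfold Spec_longestSubarrayNaive
  obtain ⟨hne, hsg⟩ := hpre
  obtain ⟨h, t, rfl⟩ : ∃ h t, nums = h :: t := by
    cases nums with
    | nil => exact absurd rfl hne
    | cons h t => exact ⟨h, t, rfl⟩
  obtain ⟨s, hsgn⟩ : ∃ s : Bool, ∀ x ∈ h :: t, Sgn s x := by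
    rcases hsg with hp | hn
    · exact ⟨true, fun x hx => by simpa [Sgn] using hp x hx⟩
    · exact ⟨false, fun x hx => by simpa [Sgn] using hn x hx⟩
  have hh : Sgn s h := hsgn h (by simp)
  have ht : ∀ x ∈ t, Sgn s x := fun x hx => hsgn x (by simp [hx])
  unfold longestSubarrayNaive longestSubarrayNaive_alt
  rw [PySem.List.pyGet?_zero_cons]
  rw [PySem.List.slice_from_one]
  simp only [List.tail_cons]
  -- A: peel off the first loop iteration, which leaves the state (1, 0, h, h) unchanged
  rw [PySem.List.enumerate_cons, List.foldl_cons]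
  simp only [zero_add]
  have hstep : naiveStep (1, 0, h, h) (0, h) = (1, 0, h, h) := by
    simp [naiveStep, PySem.Int.band_self]
  rw [hstep]
  rw [loopA_eq_gA s t h 1 1 1 0 h ht hh hh le_rfl (Or.inl ⟨le_rfl, rfl, by ring⟩)]
  -- B: unfold the head step of streak
  by_cases hall : ∀ x ∈ t, x ≤ h
  · rw [runMax_eq_of_le t h hall]
    rw [streak, if_pos rfl]
    have h1 : (if (0:Int) + 1 > 0 then (0:Int) + 1 else 0) = 1 := by norm_num
    rw [h1]
    exact gA_eq_streak_of_le t h 1 1 hall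
  · push Not at hall
    rcases hall with ⟨y, hy, hxy⟩
    have hm : h < runMax t h := lt_of_lt_of_le hxy (mem_le_runMax t h y hy)
    rw [streak, if_neg (by omega : ¬ h = runMax t h)]
    exact gA_eq_streak_of_exists t h 1 1 ⟨y, hy, hxy⟩
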